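-- pv_equiv track=rewrite | github.com/Ho1yShif/create-context-graph | src/create_context_graph/name_pools.py | get_names_for_pole_type
-- ===== SOURCE A (Python) =====
-- PERSON_NAMES = [
--     "Sarah Chen", "James Morrison", "Maria Rodriguez", "David Park",
--     "Elena Volkov", "Michael O'Brien", "Aisha Patel", "Robert Kim",
--     "Lisa Nakamura", "Carlos Gutierrez", "Fatima Al-Hassan", "Thomas Weber",
--     "Priya Sharma", "John Washington", "Yuki Tanaka", "Rachel Okonkwo",
--     "Andreas Mueller", "Sofia Petrova", "Benjamin Adeyemi", "Grace Nguyen",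
--     "Marcus Thompson", "Isabelle Fournier", "Omar Rashid", "Emily Hartman",
--     "Daniel Kowalski",
-- ]
--
-- ORGANIZATION_NAMES = [
--     "Meridian Consulting Group", "Pacific Northwest Industries",
--     "Apex Financial Partners", "Greenleaf Technologies",
--     "Summit Healthcare Systems", "Atlas Data Solutions",
--     "Cornerstone Engineering", "BlueStar Analytics",
--     "Ironwood Manufacturing", "Catalyst Research Labs",
--     "Nexus Global Services", "Harbourview Capital",
--     "Pinnacle Logistics", "Quantum Dynamics Corp",
--     "Redwood Environmental", "Sterling Associates",
--     "Trident Marine Solutions", "Vanguard Innovations",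
--     "Westfield Properties", "Zenith Aerospace",
-- ]
--
-- LOCATION_NAMES = [
--     "Downtown Medical Center", "Westside Corporate Campus",
--     "Harbor View Complex", "Mountain Ridge Facility",
--     "Riverside Research Park", "Lakefront Office Tower",
--     "Northern District Hub", "Central Processing Center",
--     "Coastal Operations Base", "Metropolitan Data Center",
--     "Valley Industrial Park", "Skyline Business Center",
--     "Oakwood Conference Center", "Bayshore Distribution Hub",
--     "Parkside Innovation Lab",
-- ]
--
-- EVENT_NAMES = [
--     "Q4 Strategy Review", "Annual Compliance Audit",
--     "Emergency Response Drill", "Product Launch Summit",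
--     "Board of Directors Meeting", "Technology Integration Workshop",
--     "Quarterly Performance Review", "Safety Inspection Round",
--     "Customer Advisory Council", "Research Symposium",
--     "Budget Planning Session", "Stakeholder Town Hall",
-- ]
--
-- OBJECT_NAMES = [
--     "Primary Analysis Report", "Standard Operating Procedure",
--     "Quarterly Assessment Document", "Technical Specification",
--     "Compliance Certificate", "Risk Evaluation Matrix",
--     "Performance Dashboard", "Quality Control Record",
--     "Strategic Initiative Brief", "Operations Manual",
--     "Incident Response Protocol", "Resource Allocation Plan",
-- ]
--
-- def get_names_for_pole_type(pole_type: str, count: int) -> list[str]: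
--     """Get realistic names appropriate for the given POLE+O type."""
--     pool = {
--         "PERSON": PERSON_NAMES,
--         "ORGANIZATION": ORGANIZATION_NAMES,
--         "LOCATION": LOCATION_NAMES,
--         "EVENT": EVENT_NAMES,
--         "OBJECT": OBJECT_NAMES,
--     }.get(pole_type.upper(), OBJECT_NAMES)
--
--     # Extend pool if more names needed than available
--     names = list(pool)
--     while len(names) < count:
--         names.extend(f"{n} {chr(65 + i)}" for i, n in enumerate(pool))
--     return names[:count]
-- ===== SOURCE B (Python) =====
-- PERSON_NAMES = [
--     "Sarah Chen", "James Morrison", "Maria Rodriguez", "David Park",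
--     "Elena Volkov", "Michael O'Brien", "Aisha Patel", "Robert Kim",
--     "Lisa Nakamura", "Carlos Gutierrez", "Fatima Al-Hassan", "Thomas Weber",
--     "Priya Sharma", "John Washington", "Yuki Tanaka", "Rachel Okonkwo",
--     "Andreas Mueller", "Sofia Petrova", "Benjamin Adeyemi", "Grace Nguyen",
--     "Marcus Thompson", "Isabelle Fournier", "Omar Rashid", "Emily Hartman",
--     "Daniel Kowalski",
-- ]
--
-- ORGANIZATION_NAMES = [
--     "Meridian Consulting Group", "Pacific Northwest Industries",
--     "Apex Financial Partners", "Greenleaf Technologies",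
--     "Summit Healthcare Systems", "Atlas Data Solutions",
--     "Cornerstone Engineering", "BlueStar Analytics",
--     "Ironwood Manufacturing", "Catalyst Research Labs",
--     "Nexus Global Services", "Harbourview Capital",
--     "Pinnacle Logistics", "Quantum Dynamics Corp",
--     "Redwood Environmental", "Sterling Associates",
--     "Trident Marine Solutions", "Vanguard Innovations",
--     "Westfield Properties", "Zenith Aerospace",
-- ]
--
-- LOCATION_NAMES = [
--     "Downtown Medical Center", "Westside Corporate Campus",
--     "Harbor View Complex", "Mountain Ridge Facility",
--     "Riverside Research Park", "Lakefront Office Tower",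
--     "Northern District Hub", "Central Processing Center",
--     "Coastal Operations Base", "Metropolitan Data Center",
--     "Valley Industrial Park", "Skyline Business Center",
--     "Oakwood Conference Center", "Bayshore Distribution Hub",
--     "Parkside Innovation Lab",
-- ]
--
-- EVENT_NAMES = [
--     "Q4 Strategy Review", "Annual Compliance Audit",
--     "Emergency Response Drill", "Product Launch Summit",
--     "Board of Directors Meeting", "Technology Integration Workshop",
--     "Quarterly Performance Review", "Safety Inspection Round",
--     "Customer Advisory Council", "Research Symposium",
--     "Budget Planning Session", "Stakeholder Town Hall",
-- ]
--
-- OBJECT_NAMES = [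
--     "Primary Analysis Report", "Standard Operating Procedure",
--     "Quarterly Assessment Document", "Technical Specification",
--     "Compliance Certificate", "Risk Evaluation Matrix",
--     "Performance Dashboard", "Quality Control Record",
--     "Strategic Initiative Brief", "Operations Manual",
--     "Incident Response Protocol", "Resource Allocation Plan",
-- ]
--
-- def get_names_for_pole_type(pole_type: str, count: int) -> list[str]:
--     """Get realistic names for the given POLE+O type via one index-driven pass."""
--     pool = {
--         "PERSON": PERSON_NAMES,
--         "ORGANIZATION": ORGANIZATION_NAMES,
--         "LOCATION": LOCATION_NAMES,
--         "EVENT": EVENT_NAMES,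
--         "OBJECT": OBJECT_NAMES,
--     }.get(pole_type.upper(), OBJECT_NAMES)
--
--     L = len(pool)
--     names = [pool[i] if i < L
--              else pool[(i - L) % L] + " " + chr(65 + (i - L) % L)
--              for i in range(max(L, count))]
--     return names[:count]
-- ===== Notes on version B (the rewrite author's own statement) =====
-- stated objective: alternative
-- what changed: Replaces A's repeated whole-pool-extension while-loop (extend a copy of the pool batch by batch, then truncate) with a single flat index-driven comprehension that computes the i-th name directly from pool[(i-L)%L] and chr(65+(i-L)%L), sliced to count.
import Mathlib
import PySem

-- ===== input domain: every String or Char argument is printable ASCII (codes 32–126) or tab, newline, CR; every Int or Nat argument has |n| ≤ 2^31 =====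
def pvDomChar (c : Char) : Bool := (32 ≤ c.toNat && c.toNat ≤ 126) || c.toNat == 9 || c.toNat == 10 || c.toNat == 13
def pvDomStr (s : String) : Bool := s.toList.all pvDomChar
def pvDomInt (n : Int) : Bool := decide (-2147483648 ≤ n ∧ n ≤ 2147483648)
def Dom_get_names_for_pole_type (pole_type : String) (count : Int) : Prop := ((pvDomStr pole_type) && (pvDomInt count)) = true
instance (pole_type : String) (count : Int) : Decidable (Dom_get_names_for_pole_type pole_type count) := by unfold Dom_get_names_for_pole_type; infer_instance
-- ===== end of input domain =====

-- B replaces A's repeated whole-pool extension loop by one flat index-driven comprehension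
-- (pool[i] for i < L, else pool[(i-L)%L] suffixed by chr(65+(i-L)%L)) sliced to count; objective: alternative.

-- ===== PORT A =====
def PERSON_NAMES : List String := [
  "Sarah Chen", "James Morrison", "Maria Rodriguez", "David Park",
  "Elena Volkov", "Michael O'Brien", "Aisha Patel", "Robert Kim",
  "Lisa Nakamura", "Carlos Gutierrez", "Fatima Al-Hassan", "Thomas Weber",
  "Priya Sharma", "John Washington", "Yuki Tanaka", "Rachel Okonkwo",
  "Andreas Mueller", "Sofia Petrova", "Benjamin Adeyemi", "Grace Nguyen",
  "Marcus Thompson", "Isabelle Fournier", "Omar Rashid", "Emily Hartman",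
  "Daniel Kowalski"]

def ORGANIZATION_NAMES : List String := [
  "Meridian Consulting Group", "Pacific Northwest Industries",
  "Apex Financial Partners", "Greenleaf Technologies",
  "Summit Healthcare Systems", "Atlas Data Solutions",
  "Cornerstone Engineering", "BlueStar Analytics",
  "Ironwood Manufacturing", "Catalyst Research Labs",
  "Nexus Global Services", "Harbourview Capital",
  "Pinnacle Logistics", "Quantum Dynamics Corp",
  "Redwood Environmental", "Sterling Associates",
  "Trident Marine Solutions", "Vanguard Innovations",
  "Westfield Properties", "Zenith Aerospace"]

def LOCATION_NAMES : List String := [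
  "Downtown Medical Center", "Westside Corporate Campus",
  "Harbor View Complex", "Mountain Ridge Facility",
  "Riverside Research Park", "Lakefront Office Tower",
  "Northern District Hub", "Central Processing Center",
  "Coastal Operations Base", "Metropolitan Data Center",
  "Valley Industrial Park", "Skyline Business Center",
  "Oakwood Conference Center", "Bayshore Distribution Hub",
  "Parkside Innovation Lab"]

def EVENT_NAMES : List String := [
  "Q4 Strategy Review", "Annual Compliance Audit",
  "Emergency Response Drill", "Product Launch Summit",
  "Board of Directors Meeting", "Technology Integration Workshop",
  "Quarterly Performance Review", "Safety Inspection Round",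
  "Customer Advisory Council", "Research Symposium",
  "Budget Planning Session", "Stakeholder Town Hall"]

def OBJECT_NAMES : List String := [
  "Primary Analysis Report", "Standard Operating Procedure",
  "Quarterly Assessment Document", "Technical Specification",
  "Compliance Certificate", "Risk Evaluation Matrix",
  "Performance Dashboard", "Quality Control Record",
  "Strategic Initiative Brief", "Operations Manual",
  "Incident Response Protocol", "Resource Allocation Plan"]

-- the dict literal {...}.get(pole_type.upper(), OBJECT_NAMES)
def pvPoolFor (pole_type : String) : List String :=
  PySem.Dict.getD (PySem.Dict.ofList [
    ("PERSON", PERSON_NAMES),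
    ("ORGANIZATION", ORGANIZATION_NAMES),
    ("LOCATION", LOCATION_NAMES),
    ("EVENT", EVENT_NAMES),
    ("OBJECT", OBJECT_NAMES)]) (PySem.Str.upper pole_type) OBJECT_NAMES

-- the generator extend(f"{n} {chr(65 + i)}" for i, n in enumerate(pool))
def pvBatch (pool : List String) : List String :=
  (PySem.List.enumerate pool 0).map
    (fun p => p.2 ++ " " ++ String.singleton (Char.ofNat (65 + p.1).toNat))

lemma pvPoolFor_ne_nil (pole_type : String) : pvPoolFor pole_type ≠ [] := by
  unfold pvPoolFor
  have hd : PySem.Dict.ofList [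
      ("PERSON", PERSON_NAMES),
      ("ORGANIZATION", ORGANIZATION_NAMES),
      ("LOCATION", LOCATION_NAMES),
      ("EVENT", EVENT_NAMES),
      ("OBJECT", OBJECT_NAMES)] = PySem.Dict.mk [
      ("PERSON", PERSON_NAMES),
      ("ORGANIZATION", ORGANIZATION_NAMES),
      ("LOCATION", LOCATION_NAMES),
      ("EVENT", EVENT_NAMES),
      ("OBJECT", OBJECT_NAMES)] := by rfl
  rw [hd]
  simp only [PySem.Dict.getD, PySem.Dict.get?_mk_cons]
  split_ifs <;> simp [PySem.Dict.get?, PERSON_NAMES, ORGANIZATION_NAMES,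
    LOCATION_NAMES, EVENT_NAMES, OBJECT_NAMES]

-- the while loop: names.extend(batch) while len(names) < count
def pvExtend (pool : List String) (hp : pool ≠ []) (count : Int) (names : List String) :
    List String :=
  if (names.length : Int) < count then
    pvExtend pool hp count (names ++ pvBatch pool)
  else names
termination_by (count - names.length).toNat
decreasing_by
  have hL : 0 < pool.length := List.length_pos_iff.mpr hp
  have hb : (pvBatch pool).length = pool.length := by
    simp [pvBatch, PySem.List.length_enumerate]
  simp only [List.length_append, hb]
  omega

def get_names_for_pole_type (pole_type : String) (count : Int) : List String :=
  PySem.List.slice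
    (pvExtend (pvPoolFor pole_type) (pvPoolFor_ne_nil pole_type) count (pvPoolFor pole_type))
    none (some count)

-- ===== PORT B =====
def pvPoolForB (pole_type : String) : List String :=
  PySem.Dict.getD (PySem.Dict.ofList [
    ("PERSON", PERSON_NAMES),
    ("ORGANIZATION", ORGANIZATION_NAMES),
    ("LOCATION", LOCATION_NAMES),
    ("EVENT", EVENT_NAMES),
    ("OBJECT", OBJECT_NAMES)]) (PySem.Str.upper pole_type) OBJECT_NAMES

-- the element formula of B's comprehension: pool[i] if i < L else pool[(i-L)%L] + " " + chr(65+(i-L)%L)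
def pvNameAt (pool : List String) (i : Int) : String :=
  if i < PySem.List.len pool then PySem.List.pyGetD pool i ""
  else
    PySem.List.pyGetD pool (PySem.Int.mod (i - PySem.List.len pool) (PySem.List.len pool)) ""
      ++ " "
      ++ String.singleton
          (Char.ofNat (65 + PySem.Int.mod (i - PySem.List.len pool) (PySem.List.len pool)).toNat)

def get_names_for_pole_type_alt (pole_type : String) (count : Int) : List String :=
  let pool := pvPoolForB pole_type
  let L : Int := PySem.List.len pool
  let names := (PySem.List.pyRange 0 (max L count) 1).map (pvNameAt pool)
  PySem.List.slice names none (some count)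

-- ===== PRECONDITION & SPEC =====
def Spec_get_names_for_pole_type (pole_type : String) (count : Int) (out : List String) : Prop := out = get_names_for_pole_type_alt pole_type count
instance (pole_type : String) (count : Int) (out : List String) : Decidable (Spec_get_names_for_pole_type pole_type count out) := by unfold Spec_get_names_for_pole_type; infer_instance

-- ===== CLAIM (what is proved, stated in full; the proofs are below) =====
def Claim_equal_get_names_for_pole_type : Prop := ∀ (pole_type : String) (count : Int), Dom_get_names_for_pole_type pole_type count → Spec_get_names_for_pole_type pole_type count (get_names_for_pole_type pole_type count)

-- ===== LEMMAS AND PROOFS =====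

-- invariant of A's loop state: length a multiple of the pool length, at least one full pool,
-- and every entry already agrees with B's index formula
def pvGood (pool names : List String) : Prop :=
  names.length % pool.length = 0 ∧ pool.length ≤ names.length ∧
    ∀ k, k < names.length → names[k]? = some (pvNameAt pool (k : Int))

lemma pvBatch_eq (pool : List String) :
    pvBatch pool = (PySem.List.pyRange 0 (PySem.List.len pool) 1).map
      (fun j => PySem.List.pyGetD pool j "" ++ " "
        ++ String.singleton (Char.ofNat (65 + j).toNat)) := by
  unfold pvBatch
  rw [PySem.List.enumerate_eq_map_pyRange pool ""]
  rw [List.map_map]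
  rfl

lemma pvBatch_getElem? (pool : List String) (m : Nat) (hm : m < pool.length) :
    (pvBatch pool)[m]? =
      some (PySem.List.pyGetD pool (m : Int) "" ++ " "
        ++ String.singleton (Char.ofNat (65 + (m : Int)).toNat)) := by
  rw [pvBatch_eq, PySem.List.len_eq, PySem.List.pyRange_one, List.map_map,
    List.getElem?_map, List.getElem?_range (by simpa using hm)]
  simp

lemma pvGood_base (pool : List String) : pvGood pool pool := by
  refine ⟨Nat.mod_self _, le_refl _, fun k hk => ?_⟩
  unfold pvNameAt
  rw [if_pos (by rw [PySem.List.len_eq]; exact_mod_cast hk)]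
  simp [List.getElem?_eq_getElem hk]

lemma pvBatch_length (pool : List String) : (pvBatch pool).length = pool.length := by
  simp [pvBatch, PySem.List.length_enumerate]

lemma pvGood_append (pool names : List String) (hp : pool ≠ [])
    (h : pvGood pool names) : pvGood pool (names ++ pvBatch pool) := by
  obtain ⟨hmod, hle, hidx⟩ := h
  have hL0 : 0 < pool.length := List.length_pos_iff.mpr hp
  refine ⟨?_, ?_, fun k hk => ?_⟩
  · rw [List.length_append, pvBatch_length, Nat.add_mod_right]
    exact hmod
  · simp only [List.length_append, pvBatch_length]
    omega
  · rcases lt_or_ge k names.length with hk1 | hk1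
    · rw [List.getElem?_append_left hk1]; exact hidx k hk1
    · rw [List.getElem?_append_right hk1]
      have hk2 : k - names.length < pool.length := by
        simp [pvBatch_length] at hk; omega
      rw [pvBatch_getElem? pool (k - names.length) hk2]
      unfold pvNameAt
      have hkL : ¬ ((k : Int) < PySem.List.len pool) := by
        rw [PySem.List.len_eq]
        exact not_lt.mpr (by exact_mod_cast le_trans hle hk1)
      rw [if_neg hkL]
      obtain ⟨q, hq⟩ := Nat.dvd_of_mod_eq_zero hmod
      have hk3 : k = pool.length * q + (k - names.length) := by omega
      have hcast : (k : Int) = (pool.length : Int) * (q : Int) + ((k - names.length : Nat) : Int) := by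
        exact_mod_cast congrArg (Nat.cast (R := Int)) hk3
      have hsplit : (k : Int) - (pool.length : Int)
          = ((k - names.length : Nat) : Int) + ((q : Int) - 1) * (pool.length : Int) := by
        linear_combination hcast
      have hmodeq : PySem.Int.mod ((k : Int) - PySem.List.len pool) (PySem.List.len pool)
          = ((k - names.length : Nat) : Int) := by
        rw [PySem.List.len_eq, PySem.Int.mod_eq_emod_of_pos (by exact_mod_cast hL0), hsplit,
          Int.add_mul_emod_self_right _ _ _]
        exact Int.emod_eq_of_lt (by omega) (by exact_mod_cast hk2)
      rw [hmodeq]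

lemma pvExtend_good (pool : List String) (hp : pool ≠ []) (count : Int)
    (names : List String) (h : pvGood pool names) :
    pvGood pool (pvExtend pool hp count names) ∧
      count ≤ ((pvExtend pool hp count names).length : Int) := by
  fun_induction pvExtend pool hp count names with
  | case1 names hcond ih => exact ih (pvGood_append pool names hp h)
  | case2 names hcond => exact ⟨h, by omega⟩

lemma pvAlt_map_getElem? (pool : List String) (N : Int) (hN : 0 ≤ N) (k : Nat)
    (hk : (k : Int) < N) :
    ((PySem.List.pyRange 0 N 1).map (pvNameAt pool))[k]? = some (pvNameAt pool (k : Int)) := by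
  rw [PySem.List.pyRange_one, List.map_map, List.getElem?_map,
    List.getElem?_range (by omega)]
  simp

lemma pvAlt_map_id (pool : List String) :
    ((PySem.List.pyRange 0 (PySem.List.len pool) 1).map (pvNameAt pool)) = pool := by
  have h : ∀ j ∈ PySem.List.pyRange 0 (PySem.List.len pool) 1,
      pvNameAt pool j = PySem.List.pyGetD pool j "" := by
    intro j hj
    rw [PySem.List.mem_pyRange_one] at hj
    unfold pvNameAt
    rw [if_pos hj.2]
  rw [List.map_congr_left h, PySem.List.map_pyGetD_pyRange_zero]

-- ===== VERDICT (by name: the statement is the Claim_ definition above) =====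
theorem get_names_for_pole_type_spec : Claim_equal_get_names_for_pole_type := by
  intro pole_type count _
  unfold Spec_get_names_for_pole_type get_names_for_pole_type get_names_for_pole_type_alt
  dsimp only
  have hpb : pvPoolForB pole_type = pvPoolFor pole_type := rfl
  rw [hpb]
  have hp : pvPoolFor pole_type ≠ [] := pvPoolFor_ne_nil pole_type
  have hL0 : 0 < (pvPoolFor pole_type).length := List.length_pos_iff.mpr hp
  have hlen : PySem.List.len (pvPoolFor pole_type) = ((pvPoolFor pole_type).length : Int) :=
    PySem.List.len_eq _
  by_cases hc : count ≤ ((pvPoolFor pole_type).length : Int)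
  · -- count ≤ len(pool): A's loop never runs and B's comprehension is exactly the pool
    have hA : pvExtend (pvPoolFor pole_type) (pvPoolFor_ne_nil pole_type) count
        (pvPoolFor pole_type) = pvPoolFor pole_type := by
      rw [pvExtend]
      simp [not_lt.mpr hc]
    have hmax : max (PySem.List.len (pvPoolFor pole_type)) count
        = PySem.List.len (pvPoolFor pole_type) := by
      rw [hlen]; exact max_eq_left hc
    rw [hA, hmax, pvAlt_map_id]
  · push Not at hc
    have hc0 : 0 ≤ count := le_of_lt (lt_trans (by exact_mod_cast hL0) hc)
    have hmax : max (PySem.List.len (pvPoolFor pole_type)) count = count := by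
      rw [hlen]; exact max_eq_right (le_of_lt hc)
    rw [hmax]
    obtain ⟨⟨-, -, hidx⟩, hlenR⟩ := pvExtend_good (pvPoolFor pole_type)
      (pvPoolFor_ne_nil pole_type) count (pvPoolFor pole_type) (pvGood_base _)
    rw [PySem.List.slice_to _ hc0, PySem.List.slice_to _ hc0]
    apply List.ext_getElem?
    intro k
    by_cases hk : k < count.toNat
    · have h1 := hidx k (by omega)
      have h2 := pvAlt_map_getElem? (pvPoolFor pole_type) count hc0 k (by omega)
      simp [hk, h1]
    · simp [hk]
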